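-- pv_equiv track=rewrite | github.com/22ema/algorithm | brute_force/candy_game_3085.py | search_candy_col
-- ===== SOURCE A (Python) =====
-- def search_candy_col(candy_list, visited_list, number, i, j, count):
--     visited_list[i][j] = True
--     if i + 1 < number and candy_list[i][j] == candy_list[i+1][j] and visited_list[i+1][j] == False:
--         count += 1
--         count = search_candy_col(candy_list, visited_list, number, i+1, j, count)
--     if 0 <= i-1 and candy_list[i][j] == candy_list[i-1][j] and visited_list[i-1][j] == False:
--         count += 1
--         count = search_candy_col(candy_list, visited_list, number, i-1, j, count)
--     return count
-- ===== SOURCE B (Python) =====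
-- # B: same count and same visited_list mutations as A, but computed with two flat
-- # iterative column scans (down then up from i) instead of the re-entrant DFS recursion.
-- # Like A, it mutates visited_list in place; the proved equivalence is about the return value.
-- def search_candy_col(candy_list, visited_list, number, i, j, count):
--     visited_list[i][j] = True
--     k = i
--     while k + 1 < number and candy_list[k][j] == candy_list[k + 1][j] and not visited_list[k + 1][j]:
--         count += 1
--         visited_list[k + 1][j] = True
--         k += 1
--     k = i
--     while k - 1 >= 0 and candy_list[k][j] == candy_list[k - 1][j] and not visited_list[k - 1][j]:
--         count += 1
--         visited_list[k - 1][j] = True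
--         k -= 1
--     return count
-- ===== Notes on version B (the rewrite author's own statement) =====
-- stated objective: simpler
-- what changed: Replaces the re-entrant DFS recursion (which re-checks both directions at every cell) with two flat iterative while-loop scans from i, one downward and one upward; no recursion, same count and same visited_list mutations.
-- outside the precondition, e.g. on search_candy_col([[1], [1]], [[False], [False]], 1, -1, 0, 0): A returns 1, B returns 1; on search_candy_col([[1], [2]], [[False], [False]], 5, 0, 0, 0): A returns 0, B returns 0
import Mathlib
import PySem

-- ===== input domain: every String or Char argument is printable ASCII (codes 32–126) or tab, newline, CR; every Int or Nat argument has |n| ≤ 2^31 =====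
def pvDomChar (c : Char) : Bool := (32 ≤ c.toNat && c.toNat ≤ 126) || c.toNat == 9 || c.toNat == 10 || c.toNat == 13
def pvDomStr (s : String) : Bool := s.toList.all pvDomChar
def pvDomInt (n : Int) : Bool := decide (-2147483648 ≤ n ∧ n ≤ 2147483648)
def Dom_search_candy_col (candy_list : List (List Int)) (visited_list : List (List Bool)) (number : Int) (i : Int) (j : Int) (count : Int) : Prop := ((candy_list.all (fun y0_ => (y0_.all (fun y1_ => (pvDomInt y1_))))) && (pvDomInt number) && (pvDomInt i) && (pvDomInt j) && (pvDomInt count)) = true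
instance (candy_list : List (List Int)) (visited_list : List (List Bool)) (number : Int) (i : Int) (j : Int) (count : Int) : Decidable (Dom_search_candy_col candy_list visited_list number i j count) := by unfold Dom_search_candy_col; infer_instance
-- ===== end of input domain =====

-- B replaces A's re-entrant DFS recursion with two flat iterative while-loop scans from i (down, then up).
-- Both Pythons mutate visited_list in place identically; the equivalence proved here is about the return value.

-- shared cell helpers: Python's candy_list[k][j] / visited_list[k][j] reads and `visited_list[k][j] = True`
def cellI (g : List (List Int)) (k j : Int) : Int :=
  PySem.List.pyGetD (PySem.List.pyGetD g k []) j 0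
def cellB (v : List (List Bool)) (k j : Int) : Bool :=
  PySem.List.pyGetD (PySem.List.pyGetD v k []) j false
def setCell (v : List (List Bool)) (k j : Int) : List (List Bool) :=
  match PySem.List.pyGet? v k with
  | none => v
  | some row => PySem.List.pySetD v k (PySem.List.pySetD row j true)

-- ===== PORT A =====
-- A's recursion step for step, made total by a fuel argument (the visited marks force every recursive
-- call onto a fresh row, so depth ≤ visited_list.length and the fuel below never runs out under Pre_);
-- the mutated grid is threaded as explicit state, the return value is the count.
def scAuxA (candy : List (List Int)) (number j : Int) :
    Nat → List (List Bool) → Int → Int → Int × List (List Bool)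
  | 0, v, _, count => (count, v)
  | fuel + 1, v, i, count =>
    let v1 := setCell v i j
    let s1 :=
      if i + 1 < number ∧ cellI candy i j = cellI candy (i+1) j ∧ cellB v1 (i+1) j = false then
        scAuxA candy number j fuel v1 (i+1) (count + 1)
      else (count, v1)
    if 0 ≤ i - 1 ∧ cellI candy i j = cellI candy (i-1) j ∧ cellB s1.2 (i-1) j = false then
      scAuxA candy number j fuel s1.2 (i-1) (s1.1 + 1)
    else s1

-- ===== PORT B =====
-- B's two while loops, one recursive helper each; fuel = a bound on the loop's iteration count
def upLoopB (candy : List (List Int)) (number j : Int) :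
    Nat → List (List Bool) → Int → Int → Int × List (List Bool)
  | 0, v, _, count => (count, v)
  | fuel + 1, v, k, count =>
    if k + 1 < number ∧ cellI candy k j = cellI candy (k+1) j ∧ cellB v (k+1) j = false then
      upLoopB candy number j fuel (setCell v (k+1) j) (k+1) (count + 1)
    else (count, v)

def downLoopB (candy : List (List Int)) (number j : Int) :
    Nat → List (List Bool) → Int → Int → Int × List (List Bool)
  | 0, v, _, count => (count, v)
  | fuel + 1, v, k, count =>
    if 0 ≤ k - 1 ∧ cellI candy k j = cellI candy (k-1) j ∧ cellB v (k-1) j = false then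
      downLoopB candy number j fuel (setCell v (k-1) j) (k-1) (count + 1)
    else (count, v)

def search_candy_col (candy_list : List (List Int)) (visited_list : List (List Bool)) (number : Int) (i : Int) (j : Int) (count : Int) : Int :=
  (scAuxA candy_list number j (visited_list.length + 1) visited_list i count).1

def search_candy_col_alt (candy_list : List (List Int)) (visited_list : List (List Bool)) (number : Int) (i : Int) (j : Int) (count : Int) : Int :=
  let v1 := setCell visited_list i j
  let s1 := upLoopB candy_list number j ((number - i).toNat + 1) v1 i count
  (downLoopB candy_list number j (i.toNat + 1) s1.2 i s1.1).1

-- ===== PRECONDITION & SPEC =====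
-- Pre_ restricts to the natural domain of the DFS: non-negative in-range row index i, a column index j
-- valid for every row (Python's negative-j wraparound included), and number not exceeding the grid
-- heights; outside it Python either raises IndexError or returns a value only via negative-row-index
-- wraparound / accidentally-in-range accesses (B returns the same values there).
def Pre_search_candy_col (candy_list : List (List Int)) (visited_list : List (List Bool)) (number : Int) (i : Int) (j : Int) (count : Int) : Prop :=
  0 ≤ i ∧ i < candy_list.length ∧ i < visited_list.length ∧
  number ≤ candy_list.length ∧ number ≤ visited_list.length ∧
  (∀ row ∈ candy_list, -(row.length : Int) ≤ j ∧ j < (row.length : Int)) ∧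
  (∀ row ∈ visited_list, -(row.length : Int) ≤ j ∧ j < (row.length : Int))
instance (candy_list : List (List Int)) (visited_list : List (List Bool)) (number : Int) (i : Int) (j : Int) (count : Int) : Decidable (Pre_search_candy_col candy_list visited_list number i j count) := by unfold Pre_search_candy_col; infer_instance

def pvWitness_search_candy_col : List (List Int) × List (List Bool) × Int × Int × Int × Int :=
  ([[1], [1]], [[false], [false]], 2, 0, 0, 0)

def Spec_search_candy_col (candy_list : List (List Int)) (visited_list : List (List Bool)) (number : Int) (i : Int) (j : Int) (count : Int) (out : Int) : Prop := out = search_candy_col_alt candy_list visited_list number i j count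
instance (candy_list : List (List Int)) (visited_list : List (List Bool)) (number : Int) (i : Int) (j : Int) (count : Int) (out : Int) : Decidable (Spec_search_candy_col candy_list visited_list number i j count out) := by unfold Spec_search_candy_col; infer_instance

-- ===== CLAIM (what is proved, stated in full; the proofs are below) =====
def Claim_equal_search_candy_col : Prop := ∀ (candy_list : List (List Int)) (visited_list : List (List Bool)) (number : Int) (i : Int) (j : Int) (count : Int), Dom_search_candy_col candy_list visited_list number i j count → Pre_search_candy_col candy_list visited_list number i j count → Spec_search_candy_col candy_list visited_list number i j count (search_candy_col candy_list visited_list number i j count)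

-- ===== LEMMAS AND PROOFS =====

-- pure run lengths in column j of a FIXED grid: how far the same-candy unvisited run extends
-- downward (rows k+1, k+2, …) resp. upward (rows k-1, k-2, …); both ports reduce to these.
def upRun (candy : List (List Int)) (v : List (List Bool)) (n j k : Int) : Nat :=
  if h : k + 1 < n ∧ cellI candy k j = cellI candy (k+1) j ∧ cellB v (k+1) j = false then
    upRun candy v n j (k+1) + 1
  else 0
termination_by (n - k).toNat
decreasing_by omega

def downRun (candy : List (List Int)) (v : List (List Bool)) (j k : Int) : Nat :=
  if h : 0 ≤ k - 1 ∧ cellI candy k j = cellI candy (k-1) j ∧ cellB v (k-1) j = false then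
    downRun candy v j (k-1) + 1
  else 0
termination_by k.toNat
decreasing_by omega

lemma upRun_congr_aux (candy : List (List Int)) (v1 v2 : List (List Bool)) (n j : Int) :
    ∀ (m : Nat) (k : Int), (n - k).toNat ≤ m →
      (∀ b : Int, k < b → cellB v1 b j = cellB v2 b j) →
      upRun candy v1 n j k = upRun candy v2 n j k := by
  intro m
  induction m with
  | zero =>
    intro k hm _
    conv_lhs => rw [upRun]
    conv_rhs => rw [upRun]
    rw [dif_neg (by rintro ⟨h1, -, -⟩; omega), dif_neg (by rintro ⟨h1, -, -⟩; omega)]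
  | succ m ih =>
    intro k hm hcell
    have he := hcell (k+1) (by omega)
    by_cases hc : k + 1 < n ∧ cellI candy k j = cellI candy (k+1) j ∧ cellB v1 (k+1) j = false
    · conv_lhs => rw [upRun]
      conv_rhs => rw [upRun]
      rw [dif_pos hc, dif_pos ⟨hc.1, hc.2.1, he.symm.trans hc.2.2⟩,
          ih (k+1) (by omega) (fun b hb => hcell b (by omega))]
    · conv_lhs => rw [upRun]
      conv_rhs => rw [upRun]
      rw [dif_neg hc, dif_neg (by rintro ⟨h1, h2, h3⟩; exact hc ⟨h1, h2, he.trans h3⟩)]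

lemma upRun_congr (candy : List (List Int)) (v1 v2 : List (List Bool)) (n j k : Int)
    (hcell : ∀ b : Int, k < b → cellB v1 b j = cellB v2 b j) :
    upRun candy v1 n j k = upRun candy v2 n j k :=
  upRun_congr_aux candy v1 v2 n j (n - k).toNat k le_rfl hcell

lemma downRun_congr_aux (candy : List (List Int)) (v1 v2 : List (List Bool)) (j : Int) :
    ∀ (m : Nat) (k : Int), k.toNat ≤ m →
      (∀ b : Int, 0 ≤ b → b < k → cellB v1 b j = cellB v2 b j) →
      downRun candy v1 j k = downRun candy v2 j k := by
  intro m
  induction m with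
  | zero =>
    intro k hm _
    conv_lhs => rw [downRun]
    conv_rhs => rw [downRun]
    rw [dif_neg (by rintro ⟨h1, -, -⟩; omega), dif_neg (by rintro ⟨h1, -, -⟩; omega)]
  | succ m ih =>
    intro k hm hcell
    by_cases hc : 0 ≤ k - 1 ∧ cellI candy k j = cellI candy (k-1) j ∧ cellB v1 (k-1) j = false
    · have he := hcell (k-1) hc.1 (by omega)
      conv_lhs => rw [downRun]
      conv_rhs => rw [downRun]
      rw [dif_pos hc, dif_pos ⟨hc.1, hc.2.1, he.symm.trans hc.2.2⟩,
          ih (k-1) (by omega) (fun b hb0 hb => hcell b hb0 (by omega))]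
    · conv_lhs => rw [downRun]
      conv_rhs => rw [downRun]
      rw [dif_neg hc, dif_neg (by
        rintro ⟨h1, h2, h3⟩
        exact hc ⟨h1, h2, (hcell (k-1) h1 (by omega)).trans h3⟩)]

lemma downRun_congr (candy : List (List Int)) (v1 v2 : List (List Bool)) (j k : Int)
    (hcell : ∀ b : Int, 0 ≤ b → b < k → cellB v1 b j = cellB v2 b j) :
    downRun candy v1 j k = downRun candy v2 j k :=
  downRun_congr_aux candy v1 v2 j k.toNat k le_rfl hcell


lemma pyGetD_getD {α : Type} (xs : List α) (i : Int) (d : α) :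
    PySem.List.pyGetD xs i d = (PySem.List.pyGet? xs i).getD d := by
  simp [PySem.List.pyGetD, PySem.List.pyGet?]

lemma setCell_of_get0 (v : List (List Bool)) (a j : Int) (row : List Bool)
    (hg : PySem.List.pyGet? v a = some row) :
    setCell v a j = PySem.List.pySetD v a (PySem.List.pySetD row j true) := by
  unfold setCell; rw [hg]

lemma setCell_of_none (v : List (List Bool)) (a j : Int)
    (hg : PySem.List.pyGet? v a = none) : setCell v a j = v := by
  unfold setCell; rw [hg]

lemma length_setCell (v : List (List Bool)) (a j : Int) : (setCell v a j).length = v.length := by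
  unfold setCell
  cases h : PySem.List.pyGet? v a with
  | none => rfl
  | some row => exact PySem.List.length_pySetD ..

lemma mem_pySetD {α : Type} (xs : List α) (i : Int) (x r : α)
    (hr : r ∈ PySem.List.pySetD xs i x) : r ∈ xs ∨ r = x := by
  unfold PySem.List.pySetD PySem.List.pySet? at hr
  cases h : PySem.List.pyIdx? xs.length i with
  | none => rw [h] at hr; exact Or.inl hr
  | some k =>
    rw [h] at hr
    simp only [Option.map_some, Option.getD_some] at hr
    rcases List.mem_or_eq_of_mem_set hr with h1 | h1
    · exact Or.inl h1
    · exact Or.inr h1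

lemma rows_setCell (v : List (List Bool)) (a j : Int)
    (P : Nat → Prop) (h : ∀ row ∈ v, P row.length) : ∀ row ∈ setCell v a j, P row.length := by
  cases hg : PySem.List.pyGet? v a with
  | none => rw [setCell_of_none v a j hg]; exact h
  | some row =>
    rw [setCell_of_get0 v a j row hg]
    intro r hr
    rcases mem_pySetD _ _ _ _ hr with h1 | h1
    · exact h r h1
    · subst h1
      rw [PySem.List.length_pySetD]
      exact h row (PySem.List.mem_of_pyGet?_eq_some _ hg)

lemma pySetD_pyGetD_self {α : Type} (row : List α) (j : Int) (x d : α)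
    (h1 : -(row.length : Int) ≤ j) (h2 : j < (row.length : Int)) :
    PySem.List.pyGetD (PySem.List.pySetD row j x) j d = x := by
  unfold PySem.List.pyGetD PySem.List.pyGet? PySem.List.pySetD PySem.List.pySet? PySem.List.pyIdx?
  split_ifs with h3 h4
  all_goals simp_all [List.length_set]
  all_goals rw [List.getElem?_set_self (by omega)]
  all_goals rfl

lemma cellB_setCell_self (v : List (List Bool)) (a j : Int)
    (ha0 : 0 ≤ a) (ha : a < (v.length : Int))
    (hrow : ∀ row ∈ v, -(row.length : Int) ≤ j ∧ j < (row.length : Int)) :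
    cellB (setCell v a j) a j = true := by
  have han : a.toNat < v.length := by omega
  have hg : PySem.List.pyGet? v a = some v[a.toNat] :=
    PySem.List.pyGet?_eq_some_getElem _ ha0 (by omega)
  obtain ⟨hj1, hj2⟩ := hrow v[a.toNat] (List.getElem_mem han)
  rw [setCell_of_get0 v a j _ hg, PySem.List.pySetD_of_nonneg _ _ ha0]
  unfold cellB
  have houter : PySem.List.pyGetD (v.set a.toNat (PySem.List.pySetD v[a.toNat] j true)) a
      ([] : List Bool) = PySem.List.pySetD v[a.toNat] j true := by
    rw [pyGetD_getD, PySem.List.pyGet?_of_nonneg _ ha0,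
        List.getElem?_set_self (by simpa using han), Option.getD_some]
  rw [houter]
  exact pySetD_pyGetD_self v[a.toNat] j true false hj1 hj2

lemma cellB_setCell_ne (v : List (List Bool)) (a b j : Int)
    (ha : 0 ≤ a) (hb : 0 ≤ b) (hne : a ≠ b) :
    cellB (setCell v a j) b j = cellB v b j := by
  cases hg : PySem.List.pyGet? v a with
  | none => rw [setCell_of_none v a j hg]
  | some row =>
    have hinner : PySem.List.pyGetD (setCell v a j) b ([] : List Bool)
        = PySem.List.pyGetD v b [] := by
      rw [setCell_of_get0 v a j row hg, PySem.List.pySetD_of_nonneg _ _ ha,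
          pyGetD_getD, pyGetD_getD, PySem.List.pyGet?_of_nonneg _ hb,
          PySem.List.pyGet?_of_nonneg _ hb, List.getElem?_set_ne (by omega)]
    unfold cellB
    rw [hinner]

lemma scAuxA_up (candy : List (List Int)) (n j : Int) :
    ∀ (fuel : Nat) (v : List (List Bool)) (k c : Int),
      0 ≤ k → k < n → n ≤ v.length →
      (∀ row ∈ v, -(row.length : Int) ≤ j ∧ j < (row.length : Int)) →
      (n - k).toNat < fuel →
      (0 ≤ k - 1 → cellI candy k j = cellI candy (k-1) j → cellB v (k-1) j = true) →
      ∃ v', scAuxA candy n j fuel v k c = (c + (upRun candy v n j k : Int), v') ∧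
        v'.length = v.length ∧ (∀ row ∈ v', -(row.length : Int) ≤ j ∧ j < (row.length : Int)) ∧
        (∀ b : Int, 0 ≤ b → b < k → cellB v' b j = cellB v b j) := by
  intro fuel
  induction fuel with
  | zero => intro v k c _ _ _ _ hfuel _; omega
  | succ fuel ih =>
    intro v k c hk0 hkn hlen hrows hfuel hkill
    have hkv : k < (v.length : Int) := lt_of_lt_of_le hkn hlen
    have hself : cellB (setCell v k j) k j = true := cellB_setCell_self v k j hk0 hkv hrows
    have hlen1 : (setCell v k j).length = v.length := length_setCell v k j
    have hrows1 : ∀ row ∈ setCell v k j, -(row.length : Int) ≤ j ∧ j < (row.length : Int) :=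
      rows_setCell v k j (fun L => -(L : Int) ≤ j ∧ j < (L : Int)) hrows
    simp only [scAuxA]
    by_cases hC1 : k + 1 < n ∧ cellI candy k j = cellI candy (k+1) j ∧
        cellB (setCell v k j) (k+1) j = false
    · obtain ⟨v'', hrec, hl, hr, hu⟩ :=
        ih (setCell v k j) (k+1) (c+1) (by omega) hC1.1
          (by rw [hlen1]; exact hlen) hrows1 (by omega)
          (by intro _ _; simpa using hself)
      rw [if_pos hC1, hrec]
      have hC2neg : ¬(0 ≤ k - 1 ∧ cellI candy k j = cellI candy (k-1) j ∧
          cellB ((c + 1 + (upRun candy (setCell v k j) n j (k+1) : Int), v'').2) (k-1) j = false) := by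
        rintro ⟨h1, h2, h3⟩
        have h4 : cellB v'' (k-1) j = cellB (setCell v k j) (k-1) j := hu (k-1) h1 (by omega)
        rw [h4, cellB_setCell_ne v k (k-1) j hk0 h1 (by omega), hkill h1 h2] at h3
        simp at h3
      rw [if_neg hC2neg]
      have hcell1 : cellB (setCell v k j) (k+1) j = cellB v (k+1) j :=
        cellB_setCell_ne v k (k+1) j hk0 (by omega) (by omega)
      have hXc : upRun candy v n j k = upRun candy (setCell v k j) n j (k+1) + 1 := by
        conv_lhs => rw [upRun]
        rw [dif_pos ⟨hC1.1, hC1.2.1, hcell1.symm.trans hC1.2.2⟩]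
        congr 1
        exact upRun_congr candy v (setCell v k j) n j (k+1)
          (fun b hb => (cellB_setCell_ne v k b j hk0 (by omega) (by omega)).symm)
      refine ⟨v'', ?_, hl.trans hlen1, hr, ?_⟩
      · rw [hXc]; congr 1; push_cast; ring
      · intro b hb0 hbk
        rw [hu b hb0 (by omega), cellB_setCell_ne v k b j hk0 hb0 (by omega)]
    · rw [if_neg hC1]
      have hC2neg : ¬(0 ≤ k - 1 ∧ cellI candy k j = cellI candy (k-1) j ∧
          cellB ((c, setCell v k j).2) (k-1) j = false) := by
        rintro ⟨h1, h2, h3⟩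
        simp only at h3
        rw [cellB_setCell_ne v k (k-1) j hk0 h1 (by omega), hkill h1 h2] at h3
        simp at h3
      rw [if_neg hC2neg]
      have hX0 : upRun candy v n j k = 0 := by
        rw [upRun, dif_neg]
        rintro ⟨h1, h2, h3⟩
        exact hC1 ⟨h1, h2, (cellB_setCell_ne v k (k+1) j hk0 (by omega) (by omega)).trans h3⟩
      refine ⟨setCell v k j, ?_, hlen1, hrows1, ?_⟩
      · rw [hX0]; simp
      · intro b hb0 hbk
        exact cellB_setCell_ne v k b j hk0 hb0 (by omega)

lemma scAuxA_down (candy : List (List Int)) (n j : Int) :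
    ∀ (fuel : Nat) (v : List (List Bool)) (k c : Int),
      0 ≤ k → k < (v.length : Int) →
      (∀ row ∈ v, -(row.length : Int) ≤ j ∧ j < (row.length : Int)) →
      k.toNat < fuel →
      (k + 1 < n → cellI candy k j = cellI candy (k+1) j → cellB v (k+1) j = true) →
      ∃ v', scAuxA candy n j fuel v k c = (c + (downRun candy v j k : Int), v') ∧
        v'.length = v.length ∧ (∀ row ∈ v', -(row.length : Int) ≤ j ∧ j < (row.length : Int)) ∧
        (∀ b : Int, k < b → cellB v' b j = cellB v b j) := by
  intro fuel
  induction fuel with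
  | zero => intro v k c _ _ _ hfuel _; omega
  | succ fuel ih =>
    intro v k c hk0 hkv hrows hfuel hkill
    have hself : cellB (setCell v k j) k j = true := cellB_setCell_self v k j hk0 hkv hrows
    have hlen1 : (setCell v k j).length = v.length := length_setCell v k j
    have hrows1 : ∀ row ∈ setCell v k j, -(row.length : Int) ≤ j ∧ j < (row.length : Int) :=
      rows_setCell v k j (fun L => -(L : Int) ≤ j ∧ j < (L : Int)) hrows
    simp only [scAuxA]
    have hC1neg : ¬(k + 1 < n ∧ cellI candy k j = cellI candy (k+1) j ∧
        cellB (setCell v k j) (k+1) j = false) := by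
      rintro ⟨h1, h2, h3⟩
      rw [cellB_setCell_ne v k (k+1) j hk0 (by omega) (by omega), hkill h1 h2] at h3
      simp at h3
    rw [if_neg hC1neg]
    by_cases hC2 : 0 ≤ k - 1 ∧ cellI candy k j = cellI candy (k-1) j ∧
        cellB ((c, setCell v k j).2) (k-1) j = false
    · have hC2' := hC2
      simp only at hC2'
      obtain ⟨v'', hrec, hl, hr, hu⟩ :=
        ih (setCell v k j) (k-1) (c+1) hC2.1
          (by rw [hlen1]; omega) hrows1 (by omega)
          (by intro _ _; simpa using hself)
      rw [if_pos hC2, hrec]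
      have hcell1 : cellB (setCell v k j) (k-1) j = cellB v (k-1) j :=
        cellB_setCell_ne v k (k-1) j hk0 hC2.1 (by omega)
      have hXc : downRun candy v j k = downRun candy (setCell v k j) j (k-1) + 1 := by
        conv_lhs => rw [downRun]
        rw [dif_pos ⟨hC2.1, hC2.2.1, hcell1.symm.trans hC2'.2.2⟩]
        congr 1
        exact downRun_congr candy v (setCell v k j) j (k-1)
          (fun b hb0 hb => (cellB_setCell_ne v k b j hk0 hb0 (by omega)).symm)
      refine ⟨v'', ?_, hl.trans hlen1, hr, ?_⟩
      · rw [hXc]; congr 1; push_cast; ring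
      · intro b hbk
        rw [hu b (by omega), cellB_setCell_ne v k b j hk0 (by omega) (by omega)]
    · rw [if_neg hC2]
      simp only at hC2
      have hX0 : downRun candy v j k = 0 := by
        rw [downRun, dif_neg]
        rintro ⟨h1, h2, h3⟩
        exact hC2 ⟨h1, h2, (cellB_setCell_ne v k (k-1) j hk0 h1 (by omega)).trans h3⟩
      refine ⟨setCell v k j, ?_, hlen1, hrows1, ?_⟩
      · rw [hX0]; simp
      · intro b hbk
        exact cellB_setCell_ne v k b j hk0 (by omega) (by omega)

lemma upLoopB_eq (candy : List (List Int)) (n j : Int) :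
    ∀ (fuel : Nat) (v : List (List Bool)) (k c : Int),
      0 ≤ k → (n - k).toNat ≤ fuel →
      ∃ v', upLoopB candy n j fuel v k c = (c + (upRun candy v n j k : Int), v') ∧
        (∀ b : Int, 0 ≤ b → b ≤ k → cellB v' b j = cellB v b j) := by
  intro fuel
  induction fuel with
  | zero =>
    intro v k c hk0 hfuel
    refine ⟨v, ?_, fun b _ _ => rfl⟩
    rw [upLoopB, upRun, dif_neg (by rintro ⟨h1, -, -⟩; omega)]
    simp
  | succ fuel ih =>
    intro v k c hk0 hfuel
    simp only [upLoopB]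
    by_cases hC : k + 1 < n ∧ cellI candy k j = cellI candy (k+1) j ∧ cellB v (k+1) j = false
    · obtain ⟨v', hrec, hu⟩ := ih (setCell v (k+1) j) (k+1) (c+1) (by omega) (by omega)
      rw [if_pos hC, hrec]
      have hXc : upRun candy v n j k = upRun candy (setCell v (k+1) j) n j (k+1) + 1 := by
        conv_lhs => rw [upRun]
        rw [dif_pos hC]
        congr 1
        exact upRun_congr candy v (setCell v (k+1) j) n j (k+1)
          (fun b hb => (cellB_setCell_ne v (k+1) b j (by omega) (by omega) (by omega)).symm)
      refine ⟨v', ?_, ?_⟩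
      · rw [hXc]; congr 1; push_cast; ring
      · intro b hb0 hbk
        rw [hu b hb0 (by omega), cellB_setCell_ne v (k+1) b j (by omega) hb0 (by omega)]
    · rw [if_neg hC]
      have hX0 : upRun candy v n j k = 0 := by rw [upRun, dif_neg hC]
      refine ⟨v, ?_, fun b _ _ => rfl⟩
      rw [hX0]; simp

lemma downLoopB_eq (candy : List (List Int)) (n j : Int) :
    ∀ (fuel : Nat) (v : List (List Bool)) (k c : Int),
      0 ≤ k → k.toNat < fuel →
      (downLoopB candy n j fuel v k c).1 = c + (downRun candy v j k : Int) := by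
  intro fuel
  induction fuel with
  | zero => intro v k c hk0 hfuel; omega
  | succ fuel ih =>
    intro v k c hk0 hfuel
    simp only [downLoopB]
    by_cases hC : 0 ≤ k - 1 ∧ cellI candy k j = cellI candy (k-1) j ∧ cellB v (k-1) j = false
    · rw [if_pos hC, ih (setCell v (k-1) j) (k-1) (c+1) hC.1 (by omega)]
      have hXc : downRun candy v j k = downRun candy (setCell v (k-1) j) j (k-1) + 1 := by
        conv_lhs => rw [downRun]
        rw [dif_pos hC]
        congr 1
        exact downRun_congr candy v (setCell v (k-1) j) j (k-1)
          (fun b hb0 hb => (cellB_setCell_ne v (k-1) b j hC.1 hb0 (by omega)).symm)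
      rw [hXc]; push_cast; ring
    · rw [if_neg hC]
      have hX0 : downRun candy v j k = 0 := by rw [downRun, dif_neg hC]
      rw [hX0]; simp

-- A's result = count + downward run + upward run of the entry grid with (i,j) marked; so is B's
theorem ports_agree (candy : List (List Int)) (v : List (List Bool)) (n i j c : Int)
    (h1 : 0 ≤ i) (hiv : i < (v.length : Int)) (h4 : n ≤ (v.length : Int))
    (h7 : ∀ row ∈ v, -(row.length : Int) ≤ j ∧ j < (row.length : Int)) :
    search_candy_col candy v n i j c = search_candy_col_alt candy v n i j c := by
  have hself : cellB (setCell v i j) i j = true := cellB_setCell_self v i j h1 hiv h7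
  have hlen1 : (setCell v i j).length = v.length := length_setCell v i j
  have hrows1 : ∀ row ∈ setCell v i j, -(row.length : Int) ≤ j ∧ j < (row.length : Int) :=
    rows_setCell v i j (fun L => -(L : Int) ≤ j ∧ j < (L : Int)) h7
  -- B side
  obtain ⟨vB, hrecB, huB⟩ :=
    upLoopB_eq candy n j ((n - i).toNat + 1) (setCell v i j) i c h1 (by omega)
  have hBdown := downLoopB_eq candy n j (i.toNat + 1) vB i
    (c + (upRun candy (setCell v i j) n j i : Int)) h1 (by omega)
  have hDB : downRun candy vB j i = downRun candy (setCell v i j) j i :=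
    downRun_congr candy vB (setCell v i j) j i (fun b hb0 hb => huB b hb0 (by omega))
  have hB : search_candy_col_alt candy v n i j c
      = c + (upRun candy (setCell v i j) n j i : Int)
        + (downRun candy (setCell v i j) j i : Int) := by
    unfold search_candy_col_alt
    simp only [hrecB, hBdown, hDB]
  rw [hB]
  -- A side
  unfold search_candy_col
  simp only [scAuxA]
  by_cases hC1 : i + 1 < n ∧ cellI candy i j = cellI candy (i+1) j ∧
      cellB (setCell v i j) (i+1) j = false
  · obtain ⟨v2, hrecA, hl2, hr2, hu2⟩ :=
      scAuxA_up candy n j v.length (setCell v i j) (i+1) (c+1) (by omega) hC1.1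
        (by rw [hlen1]; exact h4) hrows1 (by omega)
        (by intro _ _; simpa using hself)
    rw [if_pos hC1, hrecA]
    have hU : upRun candy (setCell v i j) n j i
        = upRun candy (setCell v i j) n j (i+1) + 1 := by
      conv_lhs => rw [upRun]
      rw [dif_pos hC1]
    have hcell2 : cellB v2 i j = true := by
      rw [hu2 i h1 (by omega)]; exact hself
    by_cases hC2 : 0 ≤ i - 1 ∧ cellI candy i j = cellI candy (i-1) j ∧
        cellB v2 (i-1) j = false
    · obtain ⟨v3, hrecA2, -, -, -⟩ :=
        scAuxA_down candy n j v.length v2 (i-1)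
          (c + 1 + (upRun candy (setCell v i j) n j (i+1) : Int) + 1) hC2.1
          (by rw [hl2, hlen1]; omega) hr2 (by omega)
          (by intro _ _; simpa using hcell2)
      rw [if_pos hC2, hrecA2]
      have hD : downRun candy (setCell v i j) j i
          = downRun candy v2 j (i-1) + 1 := by
        have hcm : cellB v2 (i-1) j = cellB (setCell v i j) (i-1) j := hu2 (i-1) hC2.1 (by omega)
        conv_lhs => rw [downRun]
        rw [dif_pos ⟨hC2.1, hC2.2.1, hcm.symm.trans hC2.2.2⟩]
        congr 1
        exact downRun_congr candy (setCell v i j) v2 j (i-1)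
          (fun b hb0 hb => (hu2 b hb0 (by omega)).symm)
      rw [hU, hD]; push_cast; ring
    · rw [if_neg hC2]
      have hD : downRun candy (setCell v i j) j i = 0 := by
        rw [downRun, dif_neg]
        rintro ⟨hd1, hd2, hd3⟩
        exact hC2 ⟨hd1, hd2, (hu2 (i-1) hd1 (by omega)).trans hd3⟩
      rw [hU, hD]; push_cast; ring
  · rw [if_neg hC1]
    have hU : upRun candy (setCell v i j) n j i = 0 := by rw [upRun, dif_neg hC1]
    by_cases hC2 : 0 ≤ i - 1 ∧ cellI candy i j = cellI candy (i-1) j ∧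
        cellB ((c, setCell v i j).2) (i-1) j = false
    · have hC2' := hC2
      simp only at hC2'
      obtain ⟨v3, hrecA2, -, -, -⟩ :=
        scAuxA_down candy n j v.length (setCell v i j) (i-1) (c + 1) hC2.1
          (by rw [hlen1]; omega) hrows1 (by omega)
          (by intro _ _; simpa using hself)
      rw [if_pos hC2, hrecA2]
      have hD : downRun candy (setCell v i j) j i
          = downRun candy (setCell v i j) j (i-1) + 1 := by
        conv_lhs => rw [downRun]
        rw [dif_pos ⟨hC2.1, hC2.2.1, hC2'.2.2⟩]
      rw [hU, hD]; push_cast; ring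
    · rw [if_neg hC2]
      simp only at hC2
      have hD : downRun candy (setCell v i j) j i = 0 := by
        rw [downRun, dif_neg hC2]
      rw [hU, hD]; push_cast; ring

-- ===== VERDICT (by name: the statement is the Claim_ definition above) =====
theorem search_candy_col_spec : Claim_equal_search_candy_col := by
  intro candy_list visited_list number i j count _hdom hpre
  obtain ⟨h1, _h2, h3, _h4, h5, _h6, h7⟩ := hpre
  unfold Spec_search_candy_col
  exact ports_agree candy_list visited_list number i j count h1 h3 h5 h7
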